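-- pv_equiv track=rewrite | github.com/thawtes/ipk | source/python-livecli/usr/lib/python2.7/site-packages/livecli_cli/utils/downloads.py | get_output_format
-- ===== SOURCE A (Python) =====
-- def get_output_format(output_shortname):
--     """creates an automated filetype name,
--        it is not important if it is the right one.
--
--        Default is .mp4
--     """
--     format_map = {
--         ".flv": [
--             "flv_playlist",
--             "playlist",
--             "rtmp",
--         ],
--         ".mp4": [
--             "akamaihd",
--             "hds",
--             "http",
--             "muxed-stream",
--             "stream",
--             "test",
--         ],
--         ".ts": [
--             "hls-multi",
--             "hls",
--         ],
--     }
--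
--     output_format = ".mp4"
--
--     for _file_format, _file_type_list in format_map.items():
--         for _file_type in _file_type_list:
--             if not _file_type == output_shortname:
--                 continue
--             else:
--                 output_format = _file_format
--                 break
--     return output_format
-- ===== SOURCE B (Python) =====
-- def get_output_format(output_shortname):
--     """creates an automated filetype name,
--        it is not important if it is the right one.
--
--        Default is .mp4
--     """
--     # Early-return chain: only the non-default extensions need explicit tests;
--     # everything else (including the .mp4 shortnames) falls through to the default.
--     if output_shortname == "hls" or output_shortname == "hls-multi":
--         return ".ts"
--     if (output_shortname == "flv_playlist"
--             or output_shortname == "playlist"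
--             or output_shortname == "rtmp"):
--         return ".flv"
--     return ".mp4"
-- ===== Notes on version B (the rewrite author's own statement) =====
-- stated objective: simpler
-- what changed: Removes the data table and its nested scanning loops entirely: B is an early-return chain that tests only the five shortnames with a non-default extension and falls through to '.mp4' for everything else (the '.mp4' list in A is redundant since '.mp4' is the default).
import Mathlib
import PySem

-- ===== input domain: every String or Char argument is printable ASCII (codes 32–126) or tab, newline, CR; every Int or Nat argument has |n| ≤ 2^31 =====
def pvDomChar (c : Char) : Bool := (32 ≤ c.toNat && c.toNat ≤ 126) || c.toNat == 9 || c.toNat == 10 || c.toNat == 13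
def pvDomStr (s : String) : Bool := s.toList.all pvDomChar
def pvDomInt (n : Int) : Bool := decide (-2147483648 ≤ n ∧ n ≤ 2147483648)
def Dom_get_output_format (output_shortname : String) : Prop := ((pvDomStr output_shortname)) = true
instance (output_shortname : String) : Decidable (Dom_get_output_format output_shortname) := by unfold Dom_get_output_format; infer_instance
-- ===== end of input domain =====

-- B drops A's data table and nested scanning loops: an early-return chain tests only the
-- five shortnames with a non-default extension and falls through to ".mp4" (objective: simpler).

-- ===== PORT A =====
-- the literal dict format_map, as an insertion-ordered association list
def pvFormatMap : List (String × List String) :=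
  [(".flv", ["flv_playlist", "playlist", "rtmp"]),
   (".mp4", ["akamaihd", "hds", "http", "muxed-stream", "stream", "test"]),
   (".ts",  ["hls-multi", "hls"])]

-- inner 'for _file_type in _file_type_list' loop with its continue/break
def pvInnerLoop (output_shortname file_format : String) :
    List String → String → String
  | [], acc => acc
  | t :: ts, acc =>
      if ¬(t == output_shortname) then pvInnerLoop output_shortname file_format ts acc
      else file_format

def get_output_format (output_shortname : String) : String :=
  pvFormatMap.foldl
    (fun output_format p => pvInnerLoop output_shortname p.1 p.2 output_format)
    ".mp4"

-- ===== PORT B =====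
-- early-return chain: the ".ts" test, the ".flv" test, then the default
def get_output_format_alt (output_shortname : String) : String :=
  if output_shortname == "hls" || output_shortname == "hls-multi" then ".ts"
  else if output_shortname == "flv_playlist" || output_shortname == "playlist"
       || output_shortname == "rtmp" then ".flv"
  else ".mp4"

-- ===== PRECONDITION & SPEC =====
def Spec_get_output_format (output_shortname : String) (out : String) : Prop := out = get_output_format_alt output_shortname
instance (output_shortname : String) (out : String) : Decidable (Spec_get_output_format output_shortname out) := by unfold Spec_get_output_format; infer_instance

-- ===== CLAIM (what is proved, stated in full; the proofs are below) =====
def Claim_equal_get_output_format : Prop := ∀ (output_shortname : String), Dom_get_output_format output_shortname → Spec_get_output_format output_shortname (get_output_format output_shortname)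

-- ===== LEMMAS AND PROOFS =====
theorem pvMain (s : String) : get_output_format s = get_output_format_alt s := by
  by_cases h1 : s = "flv_playlist"
  · subst h1; decide
  by_cases h2 : s = "playlist"
  · subst h2; decide
  by_cases h3 : s = "rtmp"
  · subst h3; decide
  by_cases h4 : s = "akamaihd"
  · subst h4; decide
  by_cases h5 : s = "hds"
  · subst h5; decide
  by_cases h6 : s = "http"
  · subst h6; decide
  by_cases h7 : s = "muxed-stream"
  · subst h7; decide
  by_cases h8 : s = "stream"
  · subst h8; decide
  by_cases h9 : s = "test"
  · subst h9; decide
  by_cases h10 : s = "hls-multi"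
  · subst h10; decide
  by_cases h11 : s = "hls"
  · subst h11; decide
  simp only [get_output_format, get_output_format_alt, pvFormatMap, List.foldl,
    pvInnerLoop, beq_iff_eq]
  simp [Ne.symm h1, Ne.symm h2, Ne.symm h3, Ne.symm h4, Ne.symm h5, Ne.symm h6, Ne.symm h7,
    Ne.symm h8, Ne.symm h9, Ne.symm h10, Ne.symm h11, h1, h2, h3, h10, h11]

-- ===== VERDICT (by name: the statement is the Claim_ definition above) =====
theorem get_output_format_spec : Claim_equal_get_output_format := by
  intro s _
  exact pvMain s
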